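-- pv_equiv track=rewrite | github.com/dev-hang/Programmers-Algorithm | level2/oil_drilling.py | oil_drilling
-- ===== SOURCE A (Python) =====
-- from collections import deque
--
-- def oil_drilling(land):
--     m, n = len(land), len(land[0])
--     dx, dy = [0, 1, 0, -1], [1, 0, -1, 0]
--     visited = [[False for _ in range(n)] for _ in range(m)]
--     result = [0 for _ in range(n)]
--
--     def dfs(pos):
--         q = deque()
--         q.append(pos)
--         x, y = pos
--         visited[x][y] = True
--         cnt = 1
--
--         c_set = set()
--         c_set.add(y)
--
--         while q:
--             cx, cy = q.popleft()
--             for i in range(4):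
--                 nx, ny = cx + dx[i], cy + dy[i]
--                 if 0 <= nx < m and 0 <= ny < n and land[nx][ny] == 1 and not visited[nx][ny]:
--                     q.append((nx, ny))
--                     visited[nx][ny] = True
--                     cnt += 1
--                     c_set.add(ny)
--
--         for c in c_set:
--             result[c] += cnt
--
--     for i in range(m):
--         for j in range(n):
--             if land[i][j] == 1 and not visited[i][j]:
--                 dfs((i, j))
--
--     return max(result)
-- ===== SOURCE B (Python) =====
-- DIRS = ((0, 1), (1, 0), (0, -1), (-1, 0))
--
-- def oil_drilling(land):
--     m, n = len(land), len(land[0])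
--     ones = [(i, j) for i in range(m) for j in range(n) if land[i][j] == 1]
--     one_set = set(ones)
--     result = [0] * n
--     remaining = ones
--     while remaining:
--         comp = {remaining[0]}
--         while True:
--             added = {(x + d, y + e) for (x, y) in comp for (d, e) in DIRS
--                      if (x + d, y + e) in one_set and (x + d, y + e) not in comp}
--             if not added:
--                 break
--             comp |= added
--         size = len(comp)
--         for c in {y for (_, y) in comp}:
--             result[c] += size
--         remaining = [cell for cell in remaining if cell not in comp]
--     return max(result)
-- ===== Notes on version B (the rewrite author's own statement) =====
-- stated objective: alternative
-- what changed: A's queue-based BFS flood fill over a mutable visited matrix (with an inner dfs closure) is replaced by a worklist-free set-based fixpoint flood fill: B collects the 1-cells once, repeatedly grows the component of the first remaining cell to a fixpoint by set union, credits each touched column, and filters the remaining-cells list.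
import Mathlib
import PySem

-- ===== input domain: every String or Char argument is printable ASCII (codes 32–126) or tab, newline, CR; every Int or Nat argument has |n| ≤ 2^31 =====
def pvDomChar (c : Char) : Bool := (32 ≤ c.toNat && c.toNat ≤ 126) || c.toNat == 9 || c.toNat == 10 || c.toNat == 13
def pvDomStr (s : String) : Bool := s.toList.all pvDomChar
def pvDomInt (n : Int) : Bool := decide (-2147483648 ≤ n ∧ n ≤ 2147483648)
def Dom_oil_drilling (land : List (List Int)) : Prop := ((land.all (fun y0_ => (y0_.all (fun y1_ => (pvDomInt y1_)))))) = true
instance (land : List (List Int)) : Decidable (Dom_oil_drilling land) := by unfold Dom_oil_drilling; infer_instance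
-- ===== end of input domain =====

-- B replaces A's queue-BFS over a mutable visited matrix by a worklist-free set-based
-- fixpoint flood fill over a remaining-cells list; the RETURN value is proved equal.

-- ===== PORT A =====
def pvDx : List Int := [0, 1, 0, -1]
def pvDy : List Int := [1, 0, -1, 0]

def pvLandAt (land : List (List Int)) (x y : Int) : Int :=
  PySem.List.pyGetD (PySem.List.pyGetD land x []) y 0

def pvVGet (vis : List (List Bool)) (x y : Int) : Bool :=
  PySem.List.pyGetD (PySem.List.pyGetD vis x []) y false

def pvVSet (vis : List (List Bool)) (x y : Int) : List (List Bool) :=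
  vis.set x.toNat ((PySem.List.pyGetD vis x []).set y.toNat true)

-- the body of A's `for i in range(4):` loop
def pvCandStep (land : List (List Int)) (m n cx cy : Int)
    (st : List (Int × Int) × List (List Bool) × Int × PySem.Set Int) (i : Int) :
    List (Int × Int) × List (List Bool) × Int × PySem.Set Int :=
  let nx := cx + PySem.List.pyGetD pvDx i 0
  let ny := cy + PySem.List.pyGetD pvDy i 0
  if 0 ≤ nx ∧ nx < m ∧ 0 ≤ ny ∧ ny < n ∧ pvLandAt land nx ny = 1 ∧ pvVGet st.2.1 nx ny = false then
    (st.1 ++ [(nx, ny)], pvVSet st.2.1 nx ny, st.2.2.1 + 1, PySem.Set.add st.2.2.2 ny)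
  else st

-- A's `while q:` loop; fuel only totalises (never exhausted on admitted inputs)
def pvDfsLoop (land : List (List Int)) (m n : Int) :
    Nat → List (Int × Int) → List (List Bool) → Int → PySem.Set Int →
    List (List Bool) × Int × PySem.Set Int
  | 0, _, vis, cnt, cs => (vis, cnt, cs)
  | _ + 1, [], vis, cnt, cs => (vis, cnt, cs)
  | fuel + 1, (cx, cy) :: qrest, vis, cnt, cs =>
      let st := (PySem.List.pyRange 0 4).foldl (pvCandStep land m n cx cy) (qrest, vis, cnt, cs)
      pvDfsLoop land m n fuel st.1 st.2.1 st.2.2.1 st.2.2.2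

def pvDfs (land : List (List Int)) (m n : Int) (pos : Int × Int)
    (vis : List (List Bool)) (result : List Int) : List (List Bool) × List Int :=
  let st := pvDfsLoop land m n (m.toNat * n.toNat + 1) [pos] (pvVSet vis pos.1 pos.2) 1
      (PySem.Set.add PySem.Set.empty pos.2)
  (st.1, st.2.2.foldl (fun r c => r.set c.toNat (PySem.List.pyGetD r c 0 + st.2.1)) result)

-- body of A's `for j in range(n):` loop
def pvScanCell (land : List (List Int)) (m n i : Int)
    (st : List (List Bool) × List Int) (j : Int) : List (List Bool) × List Int :=
  if pvLandAt land i j = 1 ∧ pvVGet st.1 i j = false then pvDfs land m n (i, j) st.1 st.2 else st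

-- body of A's `for i in range(m):` loop
def pvScanRow (land : List (List Int)) (m n : Int)
    (st : List (List Bool) × List Int) (i : Int) : List (List Bool) × List Int :=
  (PySem.List.pyRange 0 n).foldl (pvScanCell land m n i) st

def oil_drilling (land : List (List Int)) : Int :=
  let m : Int := land.length
  let n : Int := (PySem.List.pyGetD land 0 []).length
  let visited : List (List Bool) := (PySem.List.pyRange 0 m).map (fun _ => (PySem.List.pyRange 0 n).map (fun _ => false))
  let result : List Int := (PySem.List.pyRange 0 n).map (fun _ => 0)
  let st := (PySem.List.pyRange 0 m).foldl (pvScanRow land m n) (visited, result)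
  (PySem.List.max? st.2 (fun x => x)).getD 0

-- ===== PORT B =====
def pvDirs : List (Int × Int) := [(0, 1), (1, 0), (0, -1), (-1, 0)]

-- B's inner `while True:` grow-to-fixpoint loop; fuel only totalises
def pvGrow (oneSet : PySem.Set (Int × Int)) :
    Nat → PySem.Set (Int × Int) → PySem.Set (Int × Int)
  | 0, comp => comp
  | fuel + 1, comp =>
      let added : PySem.Set (Int × Int) := PySem.Set.ofList (comp.flatMap (fun p =>
        (pvDirs.map (fun d => (p.1 + d.1, p.2 + d.2))).filter
          (fun q => PySem.Set.contains oneSet q && !PySem.Set.contains comp q)))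
      if added.isEmpty then comp else pvGrow oneSet fuel (PySem.Set.union comp added)

-- B's outer `while remaining:` loop; fuel only totalises
def pvOuterB (oneSet : PySem.Set (Int × Int)) :
    Nat → List (Int × Int) → List Int → List Int
  | 0, _, result => result
  | _ + 1, [], result => result
  | fuel + 1, seed :: rest, result =>
      let comp := pvGrow oneSet (oneSet.length + 1) (PySem.Set.add PySem.Set.empty seed)
      let size : Int := comp.length
      let cols : PySem.Set Int := PySem.Set.ofList (comp.map Prod.snd)
      let result := cols.foldl (fun r c => r.set c.toNat (PySem.List.pyGetD r c 0 + size)) result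
      pvOuterB oneSet fuel ((seed :: rest).filter (fun p => !PySem.Set.contains comp p)) result

def oil_drilling_alt (land : List (List Int)) : Int :=
  let m : Int := land.length
  let n : Int := (PySem.List.pyGetD land 0 []).length
  let ones : List (Int × Int) :=
    (PySem.List.pyRange 0 m).flatMap (fun i =>
      ((PySem.List.pyRange 0 n).filter (fun j => pvLandAt land i j == 1)).map (fun j => (i, j)))
  let oneSet : PySem.Set (Int × Int) := PySem.Set.ofList ones
  let result : List Int := PySem.List.pyRepeat [(0 : Int)] n
  let result := pvOuterB oneSet (ones.length + 1) ones result
  (PySem.List.max? result (fun x => x)).getD 0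

-- ===== PRECONDITION & SPEC =====
-- Pre_ excludes exactly the inputs where the Python A raises: an empty grid / empty first
-- row (ValueError: max of the empty column list) and rows shorter than the first row
-- (IndexError); B's Python raises on exactly the same inputs.
def Pre_oil_drilling (land : List (List Int)) : Prop :=
  land ≠ [] ∧ land.headD [] ≠ [] ∧ ∀ row ∈ land, (land.headD []).length ≤ row.length
instance (land : List (List Int)) : Decidable (Pre_oil_drilling land) := by
  unfold Pre_oil_drilling; infer_instance

def pvWitness_oil_drilling : List (List Int) := [[1, 0, 1], [1, 1, 0]]

def Spec_oil_drilling (land : List (List Int)) (out : Int) : Prop := out = oil_drilling_alt land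
instance (land : List (List Int)) (out : Int) : Decidable (Spec_oil_drilling land out) := by
  unfold Spec_oil_drilling; infer_instance

-- ===== CLAIM (what is proved, stated in full; the proofs are below) =====
def Claim_equal_oil_drilling : Prop := ∀ (land : List (List Int)), Dom_oil_drilling land → Pre_oil_drilling land → Spec_oil_drilling land (oil_drilling land)

-- ===== LEMMAS AND PROOFS =====

def pvM (land : List (List Int)) : Int := land.length

def pvN (land : List (List Int)) : Int := (PySem.List.pyGetD land 0 []).length

def pvOne (land : List (List Int)) (p : Int × Int) : Prop :=
  0 ≤ p.1 ∧ p.1 < pvM land ∧ 0 ≤ p.2 ∧ p.2 < pvN land ∧ pvLandAt land p.1 p.2 = 1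

def pvAdj (p q : Int × Int) : Prop := (q.1 - p.1, q.2 - p.2) ∈ pvDirs

def pvNbrs (p : Int × Int) : List (Int × Int) := pvDirs.map (fun d => (p.1 + d.1, p.2 + d.2))

def pvOnesL (land : List (List Int)) : List (Int × Int) :=
  (PySem.List.pyRange 0 (pvM land)).flatMap (fun i =>
    ((PySem.List.pyRange 0 (pvN land)).filter (fun j => pvLandAt land i j == 1)).map (fun j => (i, j)))

lemma pv_adj_iff_nbr (p q : Int × Int) : pvAdj p q ↔ q ∈ pvNbrs p := by
  simp [pvAdj, pvDirs, pvNbrs, Prod.ext_iff]; omega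

lemma pv_adj_symm {p q : Int × Int} (h : pvAdj p q) : pvAdj q p := by
  simp [pvAdj, pvDirs, Prod.ext_iff] at *; omega

lemma pv_mem_onesL (land : List (List Int)) (p : Int × Int) :
    p ∈ pvOnesL land ↔ pvOne land p := by
  obtain ⟨a, b⟩ := p
  simp [pvOnesL, List.mem_flatMap, List.mem_filter, List.mem_map,
    PySem.List.mem_pyRange_one, pvOne]
  tauto

def pvRel (land : List (List Int)) (p q : Int × Int) : Prop :=
  pvOne land p ∧ pvOne land q ∧ pvAdj p q

def pvReach (land : List (List Int)) : (Int × Int) → (Int × Int) → Prop :=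
  Relation.ReflTransGen (pvRel land)

def pvOnesF (land : List (List Int)) : Finset (Int × Int) := (pvOnesL land).toFinset

def pvStepF (land : List (List Int)) (S : Finset (Int × Int)) : Finset (Int × Int) :=
  S ∪ (pvOnesF land).filter (fun q => ∃ p ∈ S, (q.1 - p.1, q.2 - p.2) ∈ pvDirs)

def pvComp (land : List (List Int)) (p : Int × Int) : Finset (Int × Int) :=
  (pvStepF land)^[(pvOnesF land).card + 1] {p}

def pvClosed (land : List (List Int)) (U : Finset (Int × Int)) : Prop :=
  ∀ a ∈ U, ∀ b, pvRel land a b → b ∈ U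

lemma pv_rel_symm (land : List (List Int)) : Symmetric (pvRel land) := by
  rintro a b ⟨ha, hb, hadj⟩; exact ⟨hb, ha, pv_adj_symm hadj⟩

lemma pv_mem_onesF (land : List (List Int)) (p : Int × Int) :
    p ∈ pvOnesF land ↔ pvOne land p := by
  rw [pvOnesF, List.mem_toFinset, pv_mem_onesL]

lemma pv_mem_stepF (land : List (List Int)) (S : Finset (Int × Int)) (q : Int × Int) :
    q ∈ pvStepF land S ↔ q ∈ S ∨ (pvOne land q ∧ ∃ p ∈ S, pvAdj p q) := by
  simp [pvStepF, pvAdj, pv_mem_onesF]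

lemma pv_subset_stepF (land : List (List Int)) (S : Finset (Int × Int)) :
    S ⊆ pvStepF land S := Finset.subset_union_left

lemma pv_iter_subset_insert (land : List (List Int)) (p : Int × Int) (k : Nat) :
    (pvStepF land)^[k] {p} ⊆ insert p (pvOnesF land) := by
  induction k with
  | zero => simp
  | succ k ih =>
    rw [Function.iterate_succ_apply']
    intro q hq
    rw [pv_mem_stepF] at hq
    rcases hq with hq | ⟨h1, _⟩
    · exact ih hq
    · exact Finset.mem_insert_of_mem ((pv_mem_onesF land q).mpr h1)

lemma pv_iter_add (land : List (List Int)) (p : Int × Int) (j d : Nat) :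
    (pvStepF land)^[j] {p} ⊆ (pvStepF land)^[j + d] {p} := by
  induction d with
  | zero => exact Finset.Subset.refl _
  | succ d ih =>
    have : j + (d + 1) = (j + d) + 1 := by omega
    rw [this, Function.iterate_succ_apply' (pvStepF land) (j + d) {p}]
    exact ih.trans (pv_subset_stepF land _)

lemma pv_iter_mono (land : List (List Int)) (p : Int × Int) {j k : Nat} (h : j ≤ k) :
    (pvStepF land)^[j] {p} ⊆ (pvStepF land)^[k] {p} := by
  have : k = j + (k - j) := by omega
  rw [this]; exact pv_iter_add land p j (k - j)

lemma pv_iter_stab (land : List (List Int)) (p : Int × Int) {j : Nat}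
    (h : (pvStepF land)^[j+1] {p} = (pvStepF land)^[j] {p}) :
    ∀ d, (pvStepF land)^[j + d] {p} = (pvStepF land)^[j] {p} := by
  intro d
  induction d with
  | zero => rfl
  | succ d ih =>
    have h2 : j + (d + 1) = (j + d) + 1 := by omega
    rw [h2, Function.iterate_succ_apply' (pvStepF land) (j + d) {p}, ih,
      ← Function.iterate_succ_apply' (pvStepF land) j {p}, h]

lemma pv_comp_fixed (land : List (List Int)) (p : Int × Int) :
    pvStepF land (pvComp land p) = pvComp land p := by
  set N := (pvOnesF land).card with hN
  have hex : ∃ j, j ≤ N ∧ (pvStepF land)^[j+1] {p} = (pvStepF land)^[j] {p} := by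
    by_contra hex
    push Not at hex
    have hgrow : ∀ j, j ≤ N + 1 → j + 1 ≤ ((pvStepF land)^[j] {p}).card := by
      intro j hj
      induction j with
      | zero => simp
      | succ j ih =>
        have hlt := hex j (by omega)
        have hsub : (pvStepF land)^[j] {p} ⊂ (pvStepF land)^[j+1] {p} := by
          refine Finset.ssubset_iff_subset_ne.mpr ⟨?_, ?_⟩
          · rw [Function.iterate_succ_apply' (pvStepF land) j {p}]
            exact pv_subset_stepF land _
          · exact fun h => hlt h.symm
        have := Finset.card_lt_card hsub
        have := ih (by omega)
        omega
    have h1 := hgrow (N+1) (le_refl _)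
    have h2 : ((pvStepF land)^[N+1] {p}).card ≤ N + 1 := by
      calc ((pvStepF land)^[N+1] {p}).card ≤ (insert p (pvOnesF land)).card :=
            Finset.card_le_card (pv_iter_subset_insert land p (N+1))
        _ ≤ N + 1 := by rw [hN]; exact Finset.card_insert_le _ _
    omega
  obtain ⟨j, hj, hfix⟩ := hex
  have hcomp : pvComp land p = (pvStepF land)^[j] {p} := by
    rw [pvComp]
    have : N + 1 = j + (N + 1 - j) := by omega
    rw [← hN, this, pv_iter_stab land p hfix]
  rw [hcomp, ← Function.iterate_succ_apply' (pvStepF land) j {p}, hfix]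

lemma pv_mem_comp_self (land : List (List Int)) (p : Int × Int) : p ∈ pvComp land p := by
  have h0 : p ∈ (pvStepF land)^[0] {p} := by simp
  exact pv_iter_mono land p (Nat.zero_le _) h0

lemma pv_comp_subset_ones (land : List (List Int)) {p : Int × Int} (h : pvOne land p) :
    pvComp land p ⊆ pvOnesF land := by
  intro q hq
  have := pv_iter_subset_insert land p ((pvOnesF land).card + 1) hq
  rcases Finset.mem_insert.mp this with h1 | h1
  · subst h1; exact (pv_mem_onesF land q).mpr h
  · exact h1

lemma pv_comp_closed (land : List (List Int)) (p : Int × Int) :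
    pvClosed land (pvComp land p) := by
  intro a ha b ⟨h1, h2, h3⟩
  have : b ∈ pvStepF land (pvComp land p) :=
    (pv_mem_stepF land _ b).mpr (Or.inr ⟨h2, a, ha, h3⟩)
  rwa [pv_comp_fixed land p] at this

lemma pv_closed_reach (land : List (List Int)) {U : Finset (Int × Int)}
    (hU : pvClosed land U) {a b : Int × Int} (ha : a ∈ U) (h : pvReach land a b) : b ∈ U := by
  induction h with
  | refl => exact ha
  | tail _ hrel ih => exact hU _ ih _ hrel

lemma pv_mem_comp_of_reach (land : List (List Int)) {p q : Int × Int}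
    (h : pvReach land p q) : q ∈ pvComp land p :=
  pv_closed_reach land (pv_comp_closed land p) (pv_mem_comp_self land p) h

lemma pv_one_of_reach (land : List (List Int)) {p q : Int × Int}
    (hp : pvOne land p) (h : pvReach land p q) : pvOne land q := by
  induction h with
  | refl => exact hp
  | tail _ hrel _ => exact hrel.2.1

lemma pv_reach_of_mem_comp (land : List (List Int)) {p q : Int × Int}
    (hp : pvOne land p) (h : q ∈ pvComp land p) : pvReach land p q := by
  suffices hk : ∀ k, ∀ q, q ∈ (pvStepF land)^[k] {p} → pvReach land p q from
    hk _ q h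
  intro k
  induction k with
  | zero => intro q hq; simp at hq; subst hq; exact Relation.ReflTransGen.refl
  | succ k ih =>
    intro q hq
    rw [Function.iterate_succ_apply' (pvStepF land) k {p}, pv_mem_stepF] at hq
    rcases hq with hq | ⟨h1, a, ha, h2⟩
    · exact ih q hq
    · have hra := ih a ha
      exact hra.tail ⟨pv_one_of_reach land hp hra, h1, h2⟩

lemma pv_reach_symm (land : List (List Int)) {p q : Int × Int}
    (h : pvReach land p q) : pvReach land q p :=
  Relation.ReflTransGen.symmetric (pv_rel_symm land) h

lemma pv_comp_eq_of_mem (land : List (List Int)) {p q : Int × Int}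
    (hp : pvOne land p) (h : q ∈ pvComp land p) : pvComp land q = pvComp land p := by
  have hpq := pv_reach_of_mem_comp land hp h
  have hq : pvOne land q := pv_one_of_reach land hp hpq
  ext r
  constructor
  · intro hr
    exact pv_mem_comp_of_reach land (hpq.trans (pv_reach_of_mem_comp land hq hr))
  · intro hr
    exact pv_mem_comp_of_reach land
      ((pv_reach_symm land hpq).trans (pv_reach_of_mem_comp land hp hr))

lemma pv_comp_disjoint_closed (land : List (List Int)) {U : Finset (Int × Int)}
    (hU : pvClosed land U) {p : Int × Int} (hp : pvOne land p) (hnp : p ∉ U) :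
    Disjoint (pvComp land p) U := by
  rw [Finset.disjoint_left]
  intro q hq hqU
  exact hnp (pv_closed_reach land hU hqU
    (pv_reach_symm land (pv_reach_of_mem_comp land hp hq)))

lemma pv_closed_union (land : List (List Int)) {U V : Finset (Int × Int)}
    (hU : pvClosed land U) (hV : pvClosed land V) : pvClosed land (U ∪ V) := by
  intro a ha b hrel
  rcases Finset.mem_union.mp ha with h | h
  · exact Finset.mem_union_left _ (hU _ h _ hrel)
  · exact Finset.mem_union_right _ (hV _ h _ hrel)

def pvCols (K : Finset (Int × Int)) : Finset Int := K.image Prod.snd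

def pvResOK (land : List (List Int)) (res : List Int) (U : Finset (Int × Int)) : Prop :=
  res.length = (pvN land).toNat ∧ ∀ k : Nat, k < (pvN land).toNat →
    res.getD k 0 = ((U.filter (fun p => (k : Int) ∈ pvCols (pvComp land p))).card : Int)

lemma pv_cols_bounds (land : List (List Int)) {p₀ : Int × Int} (hp : pvOne land p₀)
    {c : Int} (hc : c ∈ pvCols (pvComp land p₀)) : 0 ≤ c ∧ c < pvN land := by
  obtain ⟨q, hq, hqc⟩ := Finset.mem_image.mp hc
  have := (pv_mem_onesF land q).mp (pv_comp_subset_ones land hp hq)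
  subst hqc
  exact ⟨this.2.2.1, this.2.2.2.1⟩

lemma pv_count_update (land : List (List Int)) {U : Finset (Int × Int)} {p₀ : Int × Int}
    (hp : pvOne land p₀) (hd : Disjoint U (pvComp land p₀)) (c : Int) :
    (((U ∪ pvComp land p₀).filter (fun p => c ∈ pvCols (pvComp land p))).card : Int)
      = ((U.filter (fun p => c ∈ pvCols (pvComp land p))).card : Int)
        + (if c ∈ pvCols (pvComp land p₀) then ((pvComp land p₀).card : Int) else 0) := by
  rw [Finset.filter_union]
  rw [Finset.card_union_of_disjoint (Finset.disjoint_filter_filter hd)]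
  have hcomp : ((pvComp land p₀).filter (fun p => c ∈ pvCols (pvComp land p)))
      = if c ∈ pvCols (pvComp land p₀) then pvComp land p₀ else ∅ := by
    split_ifs with hcc
    · apply Finset.filter_true_of_mem
      intro p hpmem
      rwa [pv_comp_eq_of_mem land hp hpmem]
    · apply Finset.filter_false_of_mem
      intro p hpmem
      rwa [pv_comp_eq_of_mem land hp hpmem]
  rw [hcomp]
  split_ifs <;> simp

lemma pv_getD_set (res : List Int) (c : Nat) (v : Int) (k : Nat) (hk : k < res.length) :
    (res.set c v).getD k 0 = if c = k then v else res.getD k 0 := by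
  by_cases h : c = k
  · subst h; simp [List.getD_eq_getElem?_getD, hk]
  · simp [List.getD_eq_getElem?_getD, h]

lemma pv_foldset (size : Int) (n' : Nat) :
    ∀ (cl : List Int) (res : List Int), cl.Nodup → (∀ c ∈ cl, 0 ≤ c ∧ c < (n' : Int)) →
    res.length = n' →
    (cl.foldl (fun r c => r.set c.toNat (PySem.List.pyGetD r c 0 + size)) res).length = n' ∧
    ∀ k : Nat, k < n' →
      (cl.foldl (fun r c => r.set c.toNat (PySem.List.pyGetD r c 0 + size)) res).getD k 0
        = res.getD k 0 + (if (k : Int) ∈ cl then size else 0) := by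
  intro cl
  induction cl with
  | nil => intro res _ _ hlen; simp [hlen]
  | cons c cl ih =>
    intro res hnd hb hlen
    have hc := hb c (List.mem_cons_self ..)
    have hcn : c.toNat < res.length := by omega
    have hres1len : (res.set c.toNat (PySem.List.pyGetD res c 0 + size)).length = n' := by
      simp [hlen]
    obtain ⟨ihlen, ihval⟩ := ih (res.set c.toNat (PySem.List.pyGetD res c 0 + size))
      (List.nodup_cons.mp hnd).2 (fun x hx => hb x (List.mem_cons_of_mem _ hx)) hres1len
    refine ⟨by simpa using ihlen, ?_⟩
    intro k hk
    rw [List.foldl_cons, ihval k hk, pv_getD_set res c.toNat _ k (by omega),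
      PySem.List.pyGetD_of_nonneg res 0 hc.1]
    by_cases hck : c.toNat = k
    · have hkc : (k : Int) = c := by omega
      have h2 : ((k : Int)) ∉ cl := by rw [hkc]; exact (List.nodup_cons.mp hnd).1
      have h1 : ((k : Int)) ∈ c :: cl := by rw [hkc]; exact List.mem_cons_self ..
      rw [if_pos hck, if_neg h2, if_pos h1, hck]
      ring
    · have hiff : ((k : Int) ∈ c :: cl) ↔ ((k : Int) ∈ cl) := by
        simp only [List.mem_cons]
        constructor
        · rintro (h | h)
          · exfalso; omega
          · exact h
        · exact Or.inr
      rw [if_neg hck, if_congr hiff rfl rfl]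

lemma pv_resOK_update (land : List (List Int)) {res : List Int} {U : Finset (Int × Int)}
    {p₀ : Int × Int} (hp : pvOne land p₀) (hd : Disjoint U (pvComp land p₀))
    (hres : pvResOK land res U) (cl : List Int) (hnd : cl.Nodup)
    (hmem : ∀ c : Int, c ∈ cl ↔ c ∈ pvCols (pvComp land p₀)) :
    pvResOK land
      (cl.foldl (fun r c => r.set c.toNat (PySem.List.pyGetD r c 0 + ((pvComp land p₀).card : Int))) res)
      (U ∪ pvComp land p₀) := by
  obtain ⟨hlen, hval⟩ := hres
  have hb : ∀ c ∈ cl, 0 ≤ c ∧ c < ((pvN land).toNat : Int) := by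
    intro c hc
    have := pv_cols_bounds land hp ((hmem c).mp hc)
    have h2 : (pvN land) = ((pvN land).toNat : Int) := by
      have : (0:Int) ≤ pvN land := by unfold pvN; positivity
      omega
    omega
  obtain ⟨hlen', hval'⟩ := pv_foldset ((pvComp land p₀).card : Int) (pvN land).toNat cl res hnd hb hlen
  refine ⟨hlen', ?_⟩
  intro k hk
  rw [hval' k hk, hval k hk, pv_count_update land hp hd (k : Int), if_congr (hmem (k:Int)) rfl rfl]

lemma pv_resOK_unique (land : List (List Int)) {r1 r2 : List Int} {U : Finset (Int × Int)}
    (h1 : pvResOK land r1 U) (h2 : pvResOK land r2 U) : r1 = r2 := by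
  obtain ⟨l1, v1⟩ := h1
  obtain ⟨l2, v2⟩ := h2
  apply List.ext_getElem (by omega)
  intro k hk1 hk2
  have hk : k < (pvN land).toNat := by omega
  have e1 := v1 k hk
  have e2 := v2 k hk
  rw [List.getD_eq_getElem?_getD, List.getElem?_eq_getElem hk1] at e1
  rw [List.getD_eq_getElem?_getD, List.getElem?_eq_getElem hk2] at e2
  simp at e1 e2
  rw [e1, e2]

def pvVShape (land : List (List Int)) (vis : List (List Bool)) : Prop :=
  vis.length = land.length ∧ ∀ row ∈ vis, row.length = (pvN land).toNat

def pvVEnc (land : List (List Int)) (vis : List (List Bool)) (V : Finset (Int × Int)) : Prop :=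
  ∀ x y : Int, 0 ≤ x → x < pvM land → 0 ≤ y → y < pvN land →
    (pvVGet vis x y = true ↔ (x, y) ∈ V)

lemma pv_getD_set' {α : Type} (l : List α) (c : Nat) (v d : α) (k : Nat) (hk : k < l.length) :
    (l.set c v).getD k d = if c = k then v else l.getD k d := by
  by_cases h : c = k
  · subst h; simp [List.getD_eq_getElem?_getD, hk]
  · simp [List.getD_eq_getElem?_getD, h]

lemma pv_row_mem (land : List (List Int)) {vis : List (List Bool)} (hs : pvVShape land vis)
    {x : Int} (hx0 : 0 ≤ x) (hx1 : x < pvM land) :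
    PySem.List.pyGetD vis x [] ∈ vis := by
  rw [PySem.List.pyGetD_of_nonneg vis [] hx0]
  have hlt : x.toNat < vis.length := by
    have h1 := hs.1
    have : (land.length : Int) = pvM land := rfl
    omega
  rw [List.getD_eq_getElem?_getD, List.getElem?_eq_getElem hlt]
  exact List.getElem_mem _

lemma pv_row_len (land : List (List Int)) {vis : List (List Bool)} (hs : pvVShape land vis)
    {x : Int} (hx0 : 0 ≤ x) (hx1 : x < pvM land) :
    (PySem.List.pyGetD vis x []).length = (pvN land).toNat :=
  hs.2 _ (pv_row_mem land hs hx0 hx1)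

lemma pv_vset_shape (land : List (List Int)) {vis : List (List Bool)} (hs : pvVShape land vis)
    {x y : Int} (hx0 : 0 ≤ x) (hx1 : x < pvM land) :
    pvVShape land (pvVSet vis x y) := by
  constructor
  · rw [pvVSet, List.length_set]; exact hs.1
  · intro row hrow
    rcases List.mem_or_eq_of_mem_set hrow with h | h
    · exact hs.2 _ h
    · rw [h, List.length_set]; exact pv_row_len land hs hx0 hx1

lemma pv_vset_get (land : List (List Int)) {vis : List (List Bool)} (hs : pvVShape land vis)
    {x y : Int} (hx0 : 0 ≤ x) (hx1 : x < pvM land) (hy0 : 0 ≤ y) (hy1 : y < pvN land)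
    (a b : Int) (ha0 : 0 ≤ a) (ha1 : a < pvM land) (hb0 : 0 ≤ b) (hb1 : b < pvN land) :
    pvVGet (pvVSet vis x y) a b = if a = x ∧ b = y then true else pvVGet vis a b := by
  have hm : (land.length : Int) = pvM land := rfl
  have hsl := hs.1
  have hav : a.toNat < vis.length := by omega
  rw [pvVGet, pvVSet, PySem.List.pyGetD_of_nonneg _ [] ha0,
    pv_getD_set' vis x.toNat _ [] a.toNat hav]
  by_cases hax : x.toNat = a.toNat
  · rw [if_pos hax]
    have hbr : b.toNat < ((PySem.List.pyGetD vis x []).set y.toNat true).length := by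
      rw [List.length_set, pv_row_len land hs hx0 hx1]; omega
    rw [PySem.List.pyGetD_of_nonneg _ false hb0]
    rw [pv_getD_set' _ y.toNat true false b.toNat (by rw [pv_row_len land hs hx0 hx1]; omega)]
    have hxa : a = x := by omega
    by_cases hby : y.toNat = b.toNat
    · have : b = y := by omega
      rw [if_pos hby, if_pos ⟨hxa, this⟩]
    · have hne : ¬ (a = x ∧ b = y) := by rintro ⟨_, h⟩; omega
      rw [if_neg hby, if_neg hne, pvVGet, hxa, PySem.List.pyGetD_of_nonneg _ false hb0]
  · have hne : ¬ (a = x ∧ b = y) := by rintro ⟨h, _⟩; omega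
    rw [if_neg hax, if_neg hne, pvVGet, PySem.List.pyGetD_of_nonneg _ [] ha0]

lemma pv_venc_insert (land : List (List Int)) {vis : List (List Bool)} {V : Finset (Int × Int)}
    (hs : pvVShape land vis) (he : pvVEnc land vis V)
    {x y : Int} (hx0 : 0 ≤ x) (hx1 : x < pvM land) (hy0 : 0 ≤ y) (hy1 : y < pvN land) :
    pvVEnc land (pvVSet vis x y) (insert (x, y) V) := by
  intro a b ha0 ha1 hb0 hb1
  rw [pv_vset_get land hs hx0 hx1 hy0 hy1 a b ha0 ha1 hb0 hb1, Finset.mem_insert]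
  by_cases h : a = x ∧ b = y
  · rw [if_pos h]
    simp [h.1, h.2]
  · rw [if_neg h, he a b ha0 ha1 hb0 hb1]
    have : ¬ ((a, b) = (x, y)) := by
      rw [Prod.ext_iff]; exact h
    simp [this]

def pvInv (land : List (List Int)) (p₀ : Int × Int) (V₀ : Finset (Int × Int))
    (pend q : List (Int × Int)) (vis : List (List Bool)) (cnt : Int)
    (cs : PySem.Set Int) (T : Finset (Int × Int)) : Prop :=
  pvOne land p₀ ∧ V₀ ⊆ pvOnesF land ∧ pvClosed land V₀ ∧ Disjoint V₀ T ∧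
  p₀ ∈ T ∧ T ⊆ pvComp land p₀ ∧
  (∀ r ∈ q, r ∈ T) ∧
  (∀ a ∈ T, a ∉ q → ∀ b, pvRel land a b → b ∈ V₀ ∪ T ∨ b ∈ pend) ∧
  pvVShape land vis ∧ pvVEnc land vis (V₀ ∪ T) ∧
  cnt = (T.card : Int) ∧ cs.Nodup ∧ (∀ c, c ∈ cs ↔ c ∈ pvCols T)

lemma pv_one_of_mem_T (land : List (List Int)) {p₀ a : Int × Int} {T : Finset (Int × Int)}
    (hp : pvOne land p₀) (hT : T ⊆ pvComp land p₀) (ha : a ∈ T) : pvOne land a :=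
  (pv_mem_onesF land a).mp (pv_comp_subset_ones land hp (hT ha))

set_option maxHeartbeats 1000000 in
lemma pv_cand_step (land : List (List Int)) (p₀ : Int × Int) (V₀ : Finset (Int × Int))
    (cx cy : Int) (i : Int) (pend q : List (Int × Int)) (vis : List (List Bool)) (cnt : Int)
    (cs : PySem.Set Int) (T : Finset (Int × Int))
    (hrc : pvOne land (cx + PySem.List.pyGetD pvDx i 0, cy + PySem.List.pyGetD pvDy i 0) →
      (cx + PySem.List.pyGetD pvDx i 0, cy + PySem.List.pyGetD pvDy i 0) ∈ pvComp land p₀)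
    (hinv : pvInv land p₀ V₀ ((cx + PySem.List.pyGetD pvDx i 0, cy + PySem.List.pyGetD pvDy i 0) :: pend) q vis cnt cs T) :
    ∃ q' vis' cnt' cs' T',
      pvCandStep land (pvM land) (pvN land) cx cy (q, vis, cnt, cs) i = (q', vis', cnt', cs') ∧
      pvInv land p₀ V₀ pend q' vis' cnt' cs' T' ∧
      q'.length + ((pvOnesF land).card - ((V₀ ∪ T').card))
        = q.length + ((pvOnesF land).card - ((V₀ ∪ T).card)) := by
  obtain ⟨h1, h2, h3, h4, h5, h6, h7, h8, h9, h10, h11, h12, h13⟩ := hinv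
  set nx := cx + PySem.List.pyGetD pvDx i 0 with hnx
  set ny := cy + PySem.List.pyGetD pvDy i 0 with hny
  simp only [pvCandStep]
  by_cases hcond : 0 ≤ nx ∧ nx < pvM land ∧ 0 ≤ ny ∧ ny < pvN land ∧
      pvLandAt land nx ny = 1 ∧ pvVGet vis nx ny = false
  · rw [if_pos hcond]
    obtain ⟨hb1, hb2, hb3, hb4, hb5, hb6⟩ := hcond
    refine ⟨q ++ [(nx, ny)], pvVSet vis nx ny, cnt + 1, PySem.Set.add cs ny, ?_⟩
    have hone : pvOne land (nx, ny) := ⟨hb1, hb2, hb3, hb4, hb5⟩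
    have hmemc : (nx, ny) ∈ pvComp land p₀ := hrc hone
    have hnotin : (nx, ny) ∉ V₀ ∪ T := by
      intro hmem
      rw [← h10 nx ny hb1 hb2 hb3 hb4] at hmem
      rw [hb6] at hmem
      exact Bool.false_ne_true hmem
    have hnotV : (nx, ny) ∉ V₀ := fun h => hnotin (Finset.mem_union_left _ h)
    have hnotT : (nx, ny) ∉ T := fun h => hnotin (Finset.mem_union_right _ h)
    refine ⟨insert (nx, ny) T, rfl, ⟨h1, h2, h3, ?_, Finset.mem_insert_of_mem h5, ?_, ?_, ?_, ?_, ?_, ?_, ?_, ?_⟩, ?_⟩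
    · rw [Finset.disjoint_right]
      intro a ha
      rcases Finset.mem_insert.mp ha with h | h
      · subst h; exact hnotV
      · exact (Finset.disjoint_right.mp h4) h
    · intro a ha
      rcases Finset.mem_insert.mp ha with h | h
      · subst h; exact hmemc
      · exact h6 h
    · intro r hr
      rcases List.mem_append.mp hr with h | h
      · exact Finset.mem_insert_of_mem (h7 r h)
      · rw [List.mem_singleton.mp h]; exact Finset.mem_insert_self _ _
    · intro a ha hanq b hrel
      rcases Finset.mem_insert.mp ha with h | h
      · exfalso; exact hanq (by rw [h]; exact List.mem_append_right _ (List.mem_singleton_self _))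
      · have hanq' : a ∉ q := fun hq => hanq (List.mem_append_left _ hq)
        rcases h8 a h hanq' b hrel with hin | hin
        · left
          rcases Finset.mem_union.mp hin with hh | hh
          · exact Finset.mem_union_left _ hh
          · exact Finset.mem_union_right _ (Finset.mem_insert_of_mem hh)
        · rcases List.mem_cons.mp hin with hh | hh
          · left; rw [hh]; exact Finset.mem_union_right _ (Finset.mem_insert_self _ _)
          · right; exact hh
    · exact pv_vset_shape land h9 hb1 hb2
    · have := pv_venc_insert land h9 h10 hb1 hb2 hb3 hb4
      rwa [← Finset.union_insert] at this
    · rw [Finset.card_insert_of_notMem hnotT]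
      push_cast
      omega
    · exact PySem.Set.nodup_add _ _ h12
    · intro c
      rw [PySem.Set.mem_add, h13 c, pvCols, pvCols, Finset.image_insert, Finset.mem_insert]
      tauto
    · have hsub : V₀ ∪ insert (nx, ny) T ⊆ pvOnesF land := by
        intro a ha
        rcases Finset.mem_union.mp ha with h | h
        · exact h2 h
        · exact pv_comp_subset_ones land h1 ((Finset.insert_subset hmemc h6) h)
      have hsub2 : V₀ ∪ T ⊆ pvOnesF land := by
        intro a ha
        rcases Finset.mem_union.mp ha with h | h
        · exact h2 h
        · exact pv_comp_subset_ones land h1 (h6 h)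
      have hcard1 := Finset.card_le_card hsub
      have hcard2 := Finset.card_le_card hsub2
      have hins : V₀ ∪ insert (nx, ny) T = insert (nx, ny) (V₀ ∪ T) := by
        rw [Finset.union_insert]
      have : (V₀ ∪ insert (nx, ny) T).card = (V₀ ∪ T).card + 1 := by
        rw [hins, Finset.card_insert_of_notMem hnotin]
      rw [List.length_append]
      simp only [List.length_singleton]
      omega
  · rw [if_neg hcond]
    refine ⟨q, vis, cnt, cs, T, rfl, ⟨h1, h2, h3, h4, h5, h6, h7, ?_, h9, h10, h11, h12, h13⟩, rfl⟩
    intro a ha hanq b hrel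
    rcases h8 a ha hanq b hrel with hin | hin
    · exact Or.inl hin
    · rcases List.mem_cons.mp hin with hh | hh
      · -- b is the rejected candidate: it is visited or not a one-cell
        obtain ⟨c1, c2, c3, c4, c5⟩ : pvOne land (nx, ny) := hh ▸ hrel.2.1
        by_cases hvis : pvVGet vis nx ny = false
        · exact absurd ⟨c1, c2, c3, c4, c5, hvis⟩ hcond
        · left
          rw [hh]
          have hvt : pvVGet vis nx ny = true := by
            cases hv : pvVGet vis nx ny
            · exact absurd hv hvis
            · rfl
          exact (h10 nx ny c1 c2 c3 c4).mp hvt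
      · exact Or.inr hh

lemma pv_dx0 : PySem.List.pyGetD pvDx 0 0 = 0 := by decide

lemma pv_dx1 : PySem.List.pyGetD pvDx 1 0 = 1 := by decide

lemma pv_dx2 : PySem.List.pyGetD pvDx 2 0 = 0 := by decide

lemma pv_dx3 : PySem.List.pyGetD pvDx 3 0 = -1 := by decide

lemma pv_dy0 : PySem.List.pyGetD pvDy 0 0 = 1 := by decide

lemma pv_dy1 : PySem.List.pyGetD pvDy 1 0 = 0 := by decide

lemma pv_dy2 : PySem.List.pyGetD pvDy 2 0 = -1 := by decide

lemma pv_dy3 : PySem.List.pyGetD pvDy 3 0 = 0 := by decide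

lemma pv_nbrs_eq (cx cy : Int) :
    pvNbrs (cx, cy) = [(cx + PySem.List.pyGetD pvDx 0 0, cy + PySem.List.pyGetD pvDy 0 0),
      (cx + PySem.List.pyGetD pvDx 1 0, cy + PySem.List.pyGetD pvDy 1 0),
      (cx + PySem.List.pyGetD pvDx 2 0, cy + PySem.List.pyGetD pvDy 2 0),
      (cx + PySem.List.pyGetD pvDx 3 0, cy + PySem.List.pyGetD pvDy 3 0)] := by
  rw [pv_dx0, pv_dx1, pv_dx2, pv_dx3, pv_dy0, pv_dy1, pv_dy2, pv_dy3]
  rfl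

set_option maxHeartbeats 2000000 in
lemma pv_dfsLoop_post (land : List (List Int)) (p₀ : Int × Int) (V₀ : Finset (Int × Int)) :
    ∀ (fuel : Nat) (q : List (Int × Int)) (vis : List (List Bool)) (cnt : Int)
      (cs : PySem.Set Int) (T : Finset (Int × Int)),
    pvInv land p₀ V₀ [] q vis cnt cs T →
    q.length + ((pvOnesF land).card - ((V₀ ∪ T).card)) ≤ fuel →
    ∃ T', pvInv land p₀ V₀ [] []
        (pvDfsLoop land (pvM land) (pvN land) fuel q vis cnt cs).1
        (pvDfsLoop land (pvM land) (pvN land) fuel q vis cnt cs).2.1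
        (pvDfsLoop land (pvM land) (pvN land) fuel q vis cnt cs).2.2 T' := by
  intro fuel
  induction fuel with
  | zero =>
    intro q vis cnt cs T hinv hfu
    have hq : q = [] := List.eq_nil_of_length_eq_zero (by omega)
    subst hq
    exact ⟨T, hinv⟩
  | succ fuel ih =>
    intro q vis cnt cs T hinv hfu
    cases q with
    | nil => exact ⟨T, hinv⟩
    | cons hd qrest =>
      obtain ⟨cx, cy⟩ := hd
      obtain ⟨h1, h2, h3, h4, h5, h6, h7, h8, h9, h10, h11, h12, h13⟩ := hinv
      have hcxy : (cx, cy) ∈ T := h7 _ (List.mem_cons_self ..)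
      have honecxy : pvOne land (cx, cy) := pv_one_of_mem_T land h1 h6 hcxy
      have hrc : ∀ r ∈ pvNbrs (cx, cy), pvOne land r → r ∈ pvComp land p₀ := by
        intro r hr hone
        exact pv_comp_closed land p₀ _ (h6 hcxy) r
          ⟨honecxy, hone, (pv_adj_iff_nbr (cx, cy) r).mpr hr⟩
      have hinv0 : pvInv land p₀ V₀ (pvNbrs (cx, cy)) qrest vis cnt cs T := by
        refine ⟨h1, h2, h3, h4, h5, h6, fun r hr => h7 r (List.mem_cons_of_mem _ hr), ?_, h9, h10, h11, h12, h13⟩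
        intro a ha hanq b hrel
        by_cases hacxy : a = (cx, cy)
        · right
          subst hacxy
          exact (pv_adj_iff_nbr (cx, cy) b).mp hrel.2.2
        · have : a ∉ (cx, cy) :: qrest := by
            intro hmem
            rcases List.mem_cons.mp hmem with h | h
            · exact hacxy h
            · exact hanq h
          rcases h8 a ha this b hrel with h | h
          · exact Or.inl h
          · exact absurd h (List.not_mem_nil)
      rw [pv_nbrs_eq] at hinv0 hrc
      obtain ⟨q1, vis1, cnt1, cs1, T1, heq1, hinv1, hm1⟩ := pv_cand_step land p₀ V₀ cx cy 0 _ qrest vis cnt cs T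
        (hrc _ (List.mem_cons_self ..)) hinv0
      obtain ⟨q2, vis2, cnt2, cs2, T2, heq2, hinv2, hm2⟩ := pv_cand_step land p₀ V₀ cx cy 1 _ q1 vis1 cnt1 cs1 T1
        (hrc _ (by simp)) hinv1
      obtain ⟨q3, vis3, cnt3, cs3, T3, heq3, hinv3, hm3⟩ := pv_cand_step land p₀ V₀ cx cy 2 _ q2 vis2 cnt2 cs2 T2
        (hrc _ (by simp)) hinv2
      obtain ⟨q4, vis4, cnt4, cs4, T4, heq4, hinv4, hm4⟩ := pv_cand_step land p₀ V₀ cx cy 3 _ q3 vis3 cnt3 cs3 T3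
        (hrc _ (by simp)) hinv3
      have hr4 : PySem.List.pyRange 0 4 = [0, 1, 2, 3] := by decide
      have hfold : pvDfsLoop land (pvM land) (pvN land) (fuel + 1) ((cx, cy) :: qrest) vis cnt cs
          = pvDfsLoop land (pvM land) (pvN land) fuel q4 vis4 cnt4 cs4 := by
        rw [pvDfsLoop, hr4]
        simp only [List.foldl_cons, List.foldl_nil, heq1, heq2, heq3, heq4]
      rw [hfold]
      exact ih q4 vis4 cnt4 cs4 T4 hinv4
        (by simp only [List.length_cons] at hfu; omega)

lemma pv_inv_final (land : List (List Int)) (p₀ : Int × Int) (V₀ : Finset (Int × Int))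
    (vis : List (List Bool)) (cnt : Int) (cs : PySem.Set Int) (T : Finset (Int × Int))
    (hinv : pvInv land p₀ V₀ [] [] vis cnt cs T) : T = pvComp land p₀ := by
  obtain ⟨h1, h2, h3, h4, h5, h6, h7, h8, h9, h10, h11, h12, h13⟩ := hinv
  apply Finset.Subset.antisymm h6
  intro b hb
  have hreach := pv_reach_of_mem_comp land h1 hb
  clear hb
  induction hreach with
  | refl => exact h5
  | @tail a b hpa hrel ih =>
    rcases h8 a ih (List.not_mem_nil) b hrel with h | h
    · rcases Finset.mem_union.mp h with hV | hT
      · exfalso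
        have : p₀ ∈ V₀ := pv_closed_reach land h3 hV
          (pv_reach_symm land ((hpa.tail hrel : pvReach land p₀ b)))
        exact (Finset.disjoint_left.mp h4) this h5
      · exact hT
    · exact absurd h (List.not_mem_nil)

lemma pv_onesL_len (land : List (List Int)) :
    (pvOnesL land).length ≤ (pvM land).toNat * (pvN land).toNat := by
  rw [pvOnesL, List.length_flatMap]
  have hlen : ∀ x ∈ (PySem.List.pyRange 0 (pvM land)).map (fun i =>
      (((PySem.List.pyRange 0 (pvN land)).filter (fun j => pvLandAt land i j == 1)).map
        (fun j => (i, j))).length), x ≤ (pvN land).toNat := by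
    intro x hx
    obtain ⟨i, _, hix⟩ := List.mem_map.mp hx
    subst hix
    rw [List.length_map]
    calc ((PySem.List.pyRange 0 (pvN land)).filter (fun j => pvLandAt land i j == 1)).length
        ≤ (PySem.List.pyRange 0 (pvN land)).length := List.length_filter_le _ _
      _ = (pvN land).toNat := by
          have : pvN land = (((PySem.List.pyGetD land 0 []).length : Nat) : Int) := rfl
          rw [this, PySem.List.pyRange_zero_natCast, List.length_map, List.length_range]
          simp
  calc ((PySem.List.pyRange 0 (pvM land)).map _).sum
      ≤ ((PySem.List.pyRange 0 (pvM land)).map (fun i =>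
          (((PySem.List.pyRange 0 (pvN land)).filter (fun j => pvLandAt land i j == 1)).map
            (fun j => (i, j))).length)).length * (pvN land).toNat := by
        have := List.sum_le_card_nsmul ((PySem.List.pyRange 0 (pvM land)).map (fun i =>
          (((PySem.List.pyRange 0 (pvN land)).filter (fun j => pvLandAt land i j == 1)).map
            (fun j => (i, j))).length)) ((pvN land).toNat) hlen
        simpa using this
    _ ≤ (pvM land).toNat * (pvN land).toNat := by
        rw [List.length_map]
        have : pvM land = ((land.length : Nat) : Int) := rfl
        rw [this, PySem.List.pyRange_zero_natCast, List.length_map, List.length_range]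
        simp

lemma pv_onesF_card (land : List (List Int)) :
    (pvOnesF land).card ≤ (pvM land).toNat * (pvN land).toNat :=
  le_trans (List.toFinset_card_le _) (pv_onesL_len land)

lemma pv_dfs_post (land : List (List Int)) {p₀ : Int × Int} {V₀ : Finset (Int × Int)}
    {vis : List (List Bool)} {res : List Int}
    (hp : pvOne land p₀) (hV : V₀ ⊆ pvOnesF land) (hcl : pvClosed land V₀) (hnp : p₀ ∉ V₀)
    (hs : pvVShape land vis) (he : pvVEnc land vis V₀) (hr : pvResOK land res V₀) :
    pvVShape land (pvDfs land (pvM land) (pvN land) p₀ vis res).1 ∧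
    pvVEnc land (pvDfs land (pvM land) (pvN land) p₀ vis res).1 (V₀ ∪ pvComp land p₀) ∧
    pvResOK land (pvDfs land (pvM land) (pvN land) p₀ vis res).2 (V₀ ∪ pvComp land p₀) := by
  obtain ⟨x₀, y₀⟩ := p₀
  have hone := hp
  obtain ⟨hb1, hb2, hb3, hb4, hb5⟩ := hone
  have hinv0 : pvInv land (x₀, y₀) V₀ [] [(x₀, y₀)] (pvVSet vis x₀ y₀) 1
      (PySem.Set.add PySem.Set.empty y₀) {(x₀, y₀)} := by
    refine ⟨hp, hV, hcl, by simpa using hnp, Finset.mem_singleton_self _,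
      Finset.singleton_subset_iff.mpr (pv_mem_comp_self land _), ?_, ?_, ?_, ?_, ?_, ?_, ?_⟩
    · intro r hrq; rw [List.mem_singleton.mp hrq]; exact Finset.mem_singleton_self _
    · intro a ha hanq
      exfalso
      exact hanq (by rw [Finset.mem_singleton.mp ha]; exact List.mem_singleton_self _)
    · exact pv_vset_shape land hs hb1 hb2
    · rw [Finset.union_singleton]
      exact pv_venc_insert land hs he hb1 hb2 hb3 hb4
    · simp
    · exact PySem.Set.nodup_add _ _ (List.nodup_nil)
    · intro c
      rw [PySem.Set.mem_add]
      simp [pvCols]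
  have hNle := pv_onesF_card land
  obtain ⟨T', hfin⟩ := pv_dfsLoop_post land (x₀, y₀) V₀
    ((pvM land).toNat * (pvN land).toNat + 1) [(x₀, y₀)] (pvVSet vis x₀ y₀) 1
    (PySem.Set.add PySem.Set.empty y₀) {(x₀, y₀)} hinv0 (by simp; omega)
  have hTcomp := pv_inv_final land _ _ _ _ _ _ hfin
  subst hTcomp
  obtain ⟨h1, h2, h3, h4, h5, h6, h7, h8, h9, h10, h11, h12, h13⟩ := hfin
  have hdisj : Disjoint V₀ (pvComp land (x₀, y₀)) :=
    (pv_comp_disjoint_closed land hcl hp hnp).symm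
  refine ⟨h9, h10, ?_⟩
  show pvResOK land ((pvDfsLoop land (pvM land) (pvN land) _ _ _ _ _).2.2.foldl _ res) _
  rw [h11]
  exact pv_resOK_update land hp hdisj hr _ h12 h13

def pvOut (land : List (List Int)) (U : Finset (Int × Int)) (i j : Int) : Prop :=
  ∀ p : Int × Int, pvOne land p → (p.1 < i ∨ (p.1 = i ∧ p.2 < j)) → p ∈ U

def pvOInv (land : List (List Int)) (st : List (List Bool) × List Int) (i j : Int) : Prop :=
  ∃ U, U ⊆ pvOnesF land ∧ pvClosed land U ∧ pvVShape land st.1 ∧ pvVEnc land st.1 U ∧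
    pvResOK land st.2 U ∧ pvOut land U i j

lemma pv_scan_cell (land : List (List Int)) (i j : Int) (st : List (List Bool) × List Int)
    (hi0 : 0 ≤ i) (hi1 : i < pvM land) (hj0 : 0 ≤ j) (hj1 : j < pvN land)
    (h : pvOInv land st i j) :
    pvOInv land (pvScanCell land (pvM land) (pvN land) i st j) i (j + 1) := by
  obtain ⟨U, hU1, hU2, hU3, hU4, hU5, hU6⟩ := h
  rw [pvScanCell]
  by_cases hcond : pvLandAt land i j = 1 ∧ pvVGet st.1 i j = false
  · rw [if_pos hcond]
    have hone : pvOne land (i, j) := ⟨hi0, hi1, hj0, hj1, hcond.1⟩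
    have hnotU : (i, j) ∉ U := by
      intro hmem
      rw [← hU4 i j hi0 hi1 hj0 hj1] at hmem
      rw [hcond.2] at hmem
      exact Bool.false_ne_true hmem
    obtain ⟨hsh, hen, hre⟩ := pv_dfs_post land hone hU1 hU2 hnotU hU3 hU4 hU5
    refine ⟨U ∪ pvComp land (i, j), ?_, ?_, hsh, hen, hre, ?_⟩
    · intro a ha
      rcases Finset.mem_union.mp ha with h | h
      · exact hU1 h
      · exact pv_comp_subset_ones land hone h
    · exact pv_closed_union land hU2 (pv_comp_closed land (i, j))
    · intro p hp hbef
      rcases hbef with h | ⟨hpi, hpj⟩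
      · exact Finset.mem_union_left _ (hU6 p hp (Or.inl h))
      · by_cases hpj' : p.2 < j
        · exact Finset.mem_union_left _ (hU6 p hp (Or.inr ⟨hpi, hpj'⟩))
        · have hpeq : p = (i, j) := by
            obtain ⟨pa, pb⟩ := p
            simp only at hpi hpj hpj'
            simp [Prod.ext_iff, hpi]
            omega
          rw [hpeq]
          exact Finset.mem_union_right _ (pv_mem_comp_self land _)
  · rw [if_neg hcond]
    refine ⟨U, hU1, hU2, hU3, hU4, hU5, ?_⟩
    intro p hp hbef
    rcases hbef with h | ⟨hpi, hpj⟩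
    · exact hU6 p hp (Or.inl h)
    · by_cases hpj' : p.2 < j
      · exact hU6 p hp (Or.inr ⟨hpi, hpj'⟩)
      · have hpeq : p = (i, j) := by
          obtain ⟨pa, pb⟩ := p
          simp only at hpi hpj hpj'
          simp [Prod.ext_iff, hpi]
          omega
        subst hpeq
        obtain ⟨c1, c2, c3, c4, c5⟩ := hp
        have hvt : pvVGet st.1 i j = true := by
          cases hv : pvVGet st.1 i j
          · exact absurd ⟨c5, hv⟩ hcond
          · rfl
        exact (hU4 i j c1 c2 c3 c4).mp hvt

lemma pv_scan_row_aux (land : List (List Int)) (i : Int) (hi0 : 0 ≤ i) (hi1 : i < pvM land) :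
    ∀ (d : Nat) (j : Int), 0 ≤ j → j + d = pvN land →
    ∀ st, pvOInv land st i j →
    pvOInv land ((PySem.List.pyRange j (pvN land)).foldl (pvScanCell land (pvM land) (pvN land) i) st) i (pvN land) := by
  intro d
  induction d with
  | zero =>
    intro j hj0 hjn st hst
    rw [PySem.List.pyRange_one_eq_nil (by omega)]
    simpa using (by rw [show pvN land = j by omega]; exact hst)
  | succ d ih =>
    intro j hj0 hjn st hst
    rw [PySem.List.pyRange_one_cons (by omega), List.foldl_cons]
    exact ih (j + 1) (by omega) (by omega) _
      (pv_scan_cell land i j st hi0 hi1 hj0 (by omega) hst)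

lemma pv_scan_rows_aux (land : List (List Int)) :
    ∀ (d : Nat) (i : Int), 0 ≤ i → i + d = pvM land →
    ∀ st, pvOInv land st i 0 →
    pvOInv land ((PySem.List.pyRange i (pvM land)).foldl (pvScanRow land (pvM land) (pvN land)) st) (pvM land) 0 := by
  intro d
  induction d with
  | zero =>
    intro i hi0 him st hst
    rw [PySem.List.pyRange_one_eq_nil (by omega)]
    simpa using (by rw [show pvM land = i by omega]; exact hst)
  | succ d ih =>
    intro i hi0 him st hst
    rw [PySem.List.pyRange_one_cons (by omega), List.foldl_cons]
    have hn0 : 0 ≤ pvN land := by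
      rw [pvN]; positivity
    have hrow : pvOInv land (pvScanRow land (pvM land) (pvN land) st i) i (pvN land) := by
      rw [pvScanRow]
      exact pv_scan_row_aux land i hi0 (by omega) (pvN land).toNat 0 (le_refl _) (by omega) st hst
    obtain ⟨U, hU1, hU2, hU3, hU4, hU5, hU6⟩ := hrow
    have hnext : pvOInv land (pvScanRow land (pvM land) (pvN land) st i) (i + 1) 0 := by
      refine ⟨U, hU1, hU2, hU3, hU4, hU5, ?_⟩
      intro p hp hbef
      rcases hbef with h | ⟨_, h⟩
      · by_cases hpi : p.1 < i
        · exact hU6 p hp (Or.inl hpi)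
        · have : p.1 = i := by omega
          exact hU6 p hp (Or.inr ⟨this, hp.2.2.2.1⟩)
      · exfalso; have := hp.2.2.1; omega
    exact ih (i + 1) (by omega) (by omega) _ hnext

lemma pv_len_pyRange_M (land : List (List Int)) :
    (PySem.List.pyRange 0 (pvM land)).length = land.length := by
  have : pvM land = ((land.length : Nat) : Int) := rfl
  rw [this, PySem.List.pyRange_zero_natCast, List.length_map, List.length_range]

lemma pv_len_pyRange_N (land : List (List Int)) :
    (PySem.List.pyRange 0 (pvN land)).length = (pvN land).toNat := by
  have : pvN land = (((PySem.List.pyGetD land 0 []).length : Nat) : Int) := rfl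
  rw [this, PySem.List.pyRange_zero_natCast, List.length_map, List.length_range]
  simp

lemma pv_init_OInv (land : List (List Int)) :
    pvOInv land
      ((PySem.List.pyRange 0 (pvM land)).map (fun _ => (PySem.List.pyRange 0 (pvN land)).map (fun _ => false)),
       (PySem.List.pyRange 0 (pvN land)).map (fun _ => 0)) 0 0 := by
  refine ⟨∅, Finset.empty_subset _, by intro a ha; simp at ha, ⟨?_, ?_⟩, ?_, ⟨?_, ?_⟩, ?_⟩
  · rw [List.length_map, pv_len_pyRange_M]
  · intro row hrow
    obtain ⟨_, _, hr⟩ := List.mem_map.mp hrow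
    rw [← hr, List.length_map, pv_len_pyRange_N]
  · intro x y hx0 hx1 hy0 hy1
    simp only [Finset.notMem_empty, iff_false]
    have hxl : x.toNat < ((PySem.List.pyRange 0 (pvM land)).map (fun _ => (PySem.List.pyRange 0 (pvN land)).map (fun _ => false))).length := by
      rw [List.length_map, pv_len_pyRange_M]
      have : pvM land = ((land.length : Nat) : Int) := rfl
      omega
    rw [pvVGet, PySem.List.pyGetD_of_nonneg _ [] hx0, List.getD_eq_getElem?_getD,
      List.getElem?_eq_getElem hxl]
    simp only [List.getElem_map, Option.getD_some]
    have hyl : y.toNat < ((PySem.List.pyRange 0 (pvN land)).map (fun _ => false)).length := by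
      rw [List.length_map, pv_len_pyRange_N]
      omega
    rw [PySem.List.pyGetD_of_nonneg _ false hy0, List.getD_eq_getElem?_getD,
      List.getElem?_eq_getElem hyl]
    simp
  · rw [List.length_map, pv_len_pyRange_N]
  · intro k hk
    have hkl : k < ((PySem.List.pyRange 0 (pvN land)).map (fun _ => (0:Int))).length := by
      rw [List.length_map, pv_len_pyRange_N]; omega
    rw [List.getD_eq_getElem?_getD, List.getElem?_eq_getElem hkl]
    simp
  · intro p hp hbef
    obtain ⟨c1, _, c3, _, _⟩ := hp
    rcases hbef with h | ⟨_, h⟩ <;> omega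

lemma pv_A_res (land : List (List Int)) :
    ∃ res : List Int, pvResOK land res (pvOnesF land) ∧
      oil_drilling land = (PySem.List.max? res (fun x => x)).getD 0 := by
  have hm0 : 0 ≤ pvM land := by rw [pvM]; positivity
  have hfin := pv_scan_rows_aux land (pvM land).toNat 0 (le_refl _) (by omega) _ (pv_init_OInv land)
  obtain ⟨U, hU1, hU2, hU3, hU4, hU5, hU6⟩ := hfin
  have hUeq : U = pvOnesF land := by
    apply Finset.Subset.antisymm hU1
    intro p hp
    have hone := (pv_mem_onesF land p).mp hp
    exact hU6 p hone (Or.inl hone.2.1)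
  rw [hUeq] at hU5
  exact ⟨_, hU5, rfl⟩

lemma pv_contains_iff {α : Type} [BEq α] [LawfulBEq α] (s : PySem.Set α) (x : α) :
    PySem.Set.contains s x = true ↔ x ∈ s := by
  rw [PySem.Set.contains, List.contains_iff_mem]

lemma pv_contains_onesL (land : List (List Int)) (q : Int × Int) :
    PySem.Set.contains (PySem.Set.ofList (pvOnesL land)) q = true ↔ pvOne land q := by
  rw [pv_contains_iff, PySem.Set.mem_ofList, pv_mem_onesL]

lemma pv_mem_added (land : List (List Int)) (S : PySem.Set (Int × Int)) (q : Int × Int) :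
    q ∈ PySem.Set.ofList (S.flatMap (fun p =>
        (pvDirs.map (fun d => (p.1 + d.1, p.2 + d.2))).filter
          (fun r => PySem.Set.contains (PySem.Set.ofList (pvOnesL land)) r && !PySem.Set.contains S r)))
      ↔ (∃ p ∈ S, pvAdj p q) ∧ pvOne land q ∧ q ∉ S := by
  rw [PySem.Set.mem_ofList, List.mem_flatMap]
  constructor
  · rintro ⟨p, hp, hq⟩
    obtain ⟨hqn, hcond⟩ := List.mem_filter.mp hq
    obtain ⟨h1, h2⟩ := Bool.and_eq_true_iff.mp hcond
    refine ⟨⟨p, hp, (pv_adj_iff_nbr p q).mpr hqn⟩, (pv_contains_onesL land q).mp h1, ?_⟩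
    intro hqs
    rw [Bool.not_eq_eq_eq_not, Bool.not_true] at h2
    exact absurd ((pv_contains_iff S q).mpr hqs) (by rw [h2]; exact Bool.false_ne_true)
  · rintro ⟨⟨p, hp, hadj⟩, hone, hnot⟩
    refine ⟨p, hp, List.mem_filter.mpr ⟨(pv_adj_iff_nbr p q).mp hadj, ?_⟩⟩
    rw [Bool.and_eq_true_iff]
    refine ⟨(pv_contains_onesL land q).mpr hone, ?_⟩
    rw [Bool.not_eq_eq_eq_not, Bool.not_true]
    cases hc : PySem.Set.contains S q
    · rfl
    · exact absurd ((pv_contains_iff S q).mp hc) hnot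

lemma pv_grow_post (land : List (List Int)) {seed : Int × Int} (hseed : pvOne land seed) :
    ∀ (fuel : Nat) (S : PySem.Set (Int × Int)),
    S.Nodup → seed ∈ S → S.toFinset ⊆ pvComp land seed →
    (pvComp land seed).card + 1 ≤ fuel + S.length →
    (pvGrow (PySem.Set.ofList (pvOnesL land)) fuel S).Nodup ∧
    (pvGrow (PySem.Set.ofList (pvOnesL land)) fuel S).toFinset = pvComp land seed := by
  intro fuel
  induction fuel with
  | zero =>
    intro S hnd hmem hsub hfu
    exfalso
    have h1 : S.length = S.toFinset.card := (List.toFinset_card_of_nodup hnd).symm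
    have h2 : S.toFinset.card ≤ (pvComp land seed).card := Finset.card_le_card hsub
    omega
  | succ fuel ih =>
    intro S hnd hmem hsub hfu
    rw [pvGrow]
    set A := PySem.Set.ofList (S.flatMap (fun p =>
        (pvDirs.map (fun d => (p.1 + d.1, p.2 + d.2))).filter
          (fun q => PySem.Set.contains (PySem.Set.ofList (pvOnesL land)) q && !PySem.Set.contains S q))) with hA
    by_cases hE : A.isEmpty = true
    · rw [if_pos hE]
      rw [List.isEmpty_iff] at hE
      refine ⟨hnd, ?_⟩
      have hclosed : pvClosed land S.toFinset := by
        intro a ha b hrel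
        rw [List.mem_toFinset] at ha ⊢
        by_contra hbS
        have : b ∈ A := (pv_mem_added land S b).mpr ⟨⟨a, ha, hrel.2.2⟩, hrel.2.1, hbS⟩
        rw [hE] at this
        exact absurd this (List.not_mem_nil)
      apply Finset.Subset.antisymm hsub
      intro q hq
      rw [List.mem_toFinset]
      have := pv_closed_reach land hclosed (by rwa [List.mem_toFinset])
        (pv_reach_of_mem_comp land hseed hq)
      rwa [List.mem_toFinset] at this
    · rw [if_neg hE]
      have hne : A ≠ [] := by
        intro h
        rw [h] at hE
        exact hE rfl
      obtain ⟨w, hw⟩ := List.exists_mem_of_ne_nil _ hne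
      obtain ⟨⟨pw, hpw, hadjw⟩, honew, hwnot⟩ := (pv_mem_added land S w).mp hw
      have hSsub : ∀ x, x ∈ PySem.Set.union S A ↔ x ∈ S ∨ x ∈ A :=
        fun x => PySem.Set.mem_union _ _ x
      have hsub' : (PySem.Set.union S A).toFinset ⊆ pvComp land seed := by
        intro x hx
        rw [List.mem_toFinset, hSsub x] at hx
        rcases hx with hx | hx
        · exact hsub (List.mem_toFinset.mpr hx)
        · obtain ⟨⟨p, hp, hadj⟩, hone, hnot⟩ := (pv_mem_added land S x).mp hx
          have hpc : p ∈ pvComp land seed := hsub (List.mem_toFinset.mpr hp)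
          exact pv_comp_closed land seed p hpc x
            ⟨(pv_mem_onesF land p).mp (pv_comp_subset_ones land hseed hpc), hone, hadj⟩
      have hndU : (PySem.Set.union S A).Nodup := PySem.Set.nodup_union _ _ hnd
      have hlen : S.length + 1 ≤ (PySem.Set.union S A).length := by
        have hstrict : S.toFinset ⊂ (PySem.Set.union S A).toFinset := by
          refine Finset.ssubset_iff_subset_ne.mpr ⟨?_, ?_⟩
          · intro x hx
            rw [List.mem_toFinset] at hx ⊢
            rw [hSsub x]
            exact Or.inl hx
          · intro hEq
            have : w ∈ S.toFinset := by
              rw [hEq, List.mem_toFinset, hSsub w]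
              exact Or.inr hw
            exact hwnot (List.mem_toFinset.mp this)
        have h1 := Finset.card_lt_card hstrict
        rw [List.toFinset_card_of_nodup hnd, List.toFinset_card_of_nodup hndU] at h1
        omega
      exact ih _ hndU (by rw [hSsub seed]; exact Or.inl hmem) hsub' (by omega)

lemma pv_onesSet_len (land : List (List Int)) :
    (PySem.Set.ofList (pvOnesL land)).length = (pvOnesF land).card := by
  have hnd := PySem.Set.nodup_ofList (pvOnesL land)
  have heq : (PySem.Set.ofList (pvOnesL land)).toFinset = pvOnesF land := by
    ext x
    rw [List.mem_toFinset, PySem.Set.mem_ofList, pvOnesF, List.mem_toFinset]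
  rw [← heq, List.toFinset_card_of_nodup hnd]

lemma pv_outerB_post (land : List (List Int)) :
    ∀ (fuel : Nat) (U : Finset (Int × Int)) (rem : List (Int × Int)) (res : List Int),
    U ⊆ pvOnesF land → pvClosed land U →
    rem = (pvOnesL land).filter (fun p => decide (p ∉ U)) →
    pvResOK land res U → rem.length + 1 ≤ fuel →
    pvResOK land (pvOuterB (PySem.Set.ofList (pvOnesL land)) fuel rem res) (pvOnesF land) := by
  intro fuel
  induction fuel with
  | zero => intro U rem res _ _ _ _ hfu; omega
  | succ fuel ih =>
    intro U rem res hU1 hU2 hrem hres hfu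
    cases rem with
    | nil =>
      rw [pvOuterB]
      have hUeq : U = pvOnesF land := by
        apply Finset.Subset.antisymm hU1
        intro p hp
        have hp1 : p ∈ pvOnesL land := by rwa [pvOnesF, List.mem_toFinset] at hp
        by_contra hpU
        have : p ∈ ([] : List (Int × Int)) := by
          rw [hrem, List.mem_filter]
          exact ⟨hp1, by simpa using hpU⟩
        exact absurd this (List.not_mem_nil)
      rwa [← hUeq]
    | cons seed rest =>
      have hseedf : seed ∈ (pvOnesL land).filter (fun p => decide (p ∉ U)) := by
        rw [← hrem]; exact List.mem_cons_self ..
      obtain ⟨hseed1, hseedd⟩ := List.mem_filter.mp hseedf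
      have hseedU : seed ∉ U := of_decide_eq_true hseedd
      have honese : pvOne land seed := (pv_mem_onesL land seed).mp hseed1
      have hS0 : PySem.Set.add PySem.Set.empty seed = [seed] := rfl
      have hfuel0 : (pvComp land seed).card + 1
          ≤ ((PySem.Set.ofList (pvOnesL land)).length + 1) + (PySem.Set.add PySem.Set.empty seed).length := by
        rw [hS0, pv_onesSet_len]
        have := Finset.card_le_card (pv_comp_subset_ones land honese)
        simp
        omega
      obtain ⟨hGnd, hGeq⟩ := pv_grow_post land honese ((PySem.Set.ofList (pvOnesL land)).length + 1)
        (PySem.Set.add PySem.Set.empty seed)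
        (by rw [hS0]; exact List.nodup_singleton _)
        (by rw [hS0]; exact List.mem_singleton_self _)
        (by rw [hS0]; intro x hx; rw [List.mem_toFinset, List.mem_singleton] at hx; rw [hx]; exact pv_mem_comp_self land _)
        hfuel0
      set G := pvGrow (PySem.Set.ofList (pvOnesL land)) ((PySem.Set.ofList (pvOnesL land)).length + 1)
        (PySem.Set.add PySem.Set.empty seed) with hGdef
      have hGmem : ∀ x, x ∈ G ↔ x ∈ pvComp land seed := by
        intro x
        rw [← List.mem_toFinset, hGeq]
      have hsize : ((G.length : Nat) : Int) = (((pvComp land seed).card : Nat) : Int) := by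
        rw [← hGeq, List.toFinset_card_of_nodup hGnd]
      have hcols : ∀ c : Int, c ∈ PySem.Set.ofList (G.map Prod.snd) ↔ c ∈ pvCols (pvComp land seed) := by
        intro c
        rw [PySem.Set.mem_ofList, List.mem_map, pvCols, Finset.mem_image]
        constructor
        · rintro ⟨p, hp, hpc⟩
          exact ⟨p, (hGmem p).mp hp, hpc⟩
        · rintro ⟨p, hp, hpc⟩
          exact ⟨p, (hGmem p).mpr hp, hpc⟩
      have hdisj : Disjoint U (pvComp land seed) :=
        (pv_comp_disjoint_closed land hU2 honese hseedU).symm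
      have hres' := pv_resOK_update land honese hdisj hres (PySem.Set.ofList (G.map Prod.snd))
        (PySem.Set.nodup_ofList _) hcols
      rw [← hsize] at hres'
      have hcontseed : PySem.Set.contains G seed = true :=
        (pv_contains_iff G seed).mpr ((hGmem seed).mpr (pv_mem_comp_self land seed))
      have hremlen : ((seed :: rest).filter (fun p => !PySem.Set.contains G p)).length ≤ rest.length := by
        rw [List.filter_cons_of_neg (by rw [hcontseed]; decide)]
        exact List.length_filter_le _ _
      have hrem'eq : (seed :: rest).filter (fun p => !PySem.Set.contains G p)
          = (pvOnesL land).filter (fun p => decide (p ∉ U ∪ pvComp land seed)) := by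
        rw [hrem, List.filter_filter]
        apply List.filter_congr
        intro p hp
        by_cases hpU : p ∈ U <;> by_cases hpC : p ∈ pvComp land seed <;>
          simp [hpU, hpC, Finset.mem_union, hGmem p]
      have hstep : pvOuterB (PySem.Set.ofList (pvOnesL land)) (fuel + 1) (seed :: rest) res
          = pvOuterB (PySem.Set.ofList (pvOnesL land)) fuel
              ((seed :: rest).filter (fun p => !PySem.Set.contains G p))
              ((PySem.Set.ofList (G.map Prod.snd)).foldl
                (fun r c => r.set c.toNat (PySem.List.pyGetD r c 0 + (G.length : Int))) res) := by
        rw [pvOuterB]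
      rw [hstep]
      refine ih (U ∪ pvComp land seed) _ _ ?_ ?_ hrem'eq hres' ?_
      · intro a ha
        rcases Finset.mem_union.mp ha with h | h
        · exact hU1 h
        · exact pv_comp_subset_ones land honese h
      · exact pv_closed_union land hU2 (pv_comp_closed land seed)
      · simp only [List.length_cons] at hfu
        omega

lemma pv_res0B (land : List (List Int)) :
    pvResOK land (PySem.List.pyRepeat [(0 : Int)] (pvN land)) ∅ := by
  rw [PySem.List.pyRepeat_singleton]
  constructor
  · exact List.length_replicate
  · intro k hk
    rw [List.getD_eq_getElem?_getD, List.getElem?_eq_getElem (by simpa using hk)]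
    simp

lemma pv_B_res (land : List (List Int)) :
    ∃ res : List Int, pvResOK land res (pvOnesF land) ∧
      oil_drilling_alt land = (PySem.List.max? res (fun x => x)).getD 0 := by
  have hrem0 : pvOnesL land = (pvOnesL land).filter (fun p => decide (p ∉ (∅ : Finset (Int × Int)))) := by
    rw [List.filter_eq_self.mpr]
    intro a _
    simp
  have hres := pv_outerB_post land ((pvOnesL land).length + 1) ∅ (pvOnesL land)
    (PySem.List.pyRepeat [(0 : Int)] (pvN land))
    (Finset.empty_subset _) (by intro a ha; simp at ha) hrem0 (pv_res0B land) (by omega)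
  exact ⟨_, hres, rfl⟩

-- ===== VERDICT (by name: the statement is the Claim_ definition above) =====
theorem oil_drilling_spec : Claim_equal_oil_drilling := by
  intro land _ _
  show oil_drilling land = oil_drilling_alt land
  obtain ⟨ra, hra, hA⟩ := pv_A_res land
  obtain ⟨rb, hrb, hB⟩ := pv_B_res land
  rw [hA, hB, pv_resOK_unique land hra hrb]
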